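-- pv_equiv track=rewrite | github.com/Immunotools/IgDetective | py/locus_boundaries_refiner.py | ComputeRanges
-- ===== SOURCE A (Python) =====
-- def ComputeRanges(distances, max_dist = 300000):
--     ranges = []
--     start_idx = -1
--     end_idx = -1
--     for idx, dist in enumerate(distances):
--         if dist <= max_dist:
--             if start_idx == -1:
--                 start_idx = idx
--                 end_idx = idx
--             end_idx += 1
--         else:
--             if start_idx != -1:
--                 ranges.append((start_idx, end_idx))
--             start_idx = -1
--     if start_idx != -1:
--         ranges.append((start_idx, end_idx))
--     return ranges
-- ===== SOURCE B (Python) =====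
-- def ComputeRanges(distances, max_dist = 300000):
--     ranges = []
--     i = 0
--     n = len(distances)
--     while i < n:
--         if distances[i] <= max_dist:
--             j = i
--             while j < n and distances[j] <= max_dist:
--                 j += 1
--             ranges.append((i, j))
--             i = j
--         else:
--             i += 1
--     return ranges
-- ===== Notes on version B (the rewrite author's own statement) =====
-- stated objective: alternative
-- what changed: Replaces the single flag-state pass (start_idx/end_idx sentinels with a trailing flush) by a two-level scan: an outer loop that skips large distances and an inner loop that consumes a whole run of small distances at once, emitting (run_start, run_end) immediately with no sentinel state.
import Mathlib
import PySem

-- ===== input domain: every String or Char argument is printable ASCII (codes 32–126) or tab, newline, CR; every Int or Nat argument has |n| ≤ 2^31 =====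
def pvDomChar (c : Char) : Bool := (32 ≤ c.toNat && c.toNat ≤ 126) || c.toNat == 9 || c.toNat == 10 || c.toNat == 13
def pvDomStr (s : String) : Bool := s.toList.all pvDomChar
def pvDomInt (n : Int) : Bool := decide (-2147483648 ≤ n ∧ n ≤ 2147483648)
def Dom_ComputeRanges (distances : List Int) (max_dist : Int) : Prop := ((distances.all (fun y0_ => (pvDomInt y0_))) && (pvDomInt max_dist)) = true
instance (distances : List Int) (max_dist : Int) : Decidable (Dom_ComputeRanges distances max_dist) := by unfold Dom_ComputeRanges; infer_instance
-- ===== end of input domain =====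

-- B replaces A's flag-state single pass (start_idx/end_idx sentinels + trailing flush) by an
-- outer skip loop with an inner loop consuming each run of small distances at once (alternative
-- decomposition, same cost).


-- ===== PORT A =====
-- A's for-loop over enumerate(distances) as structural recursion over the same state
-- (ranges, start_idx, end_idx), idx carried explicitly.
def aLoop (md : Int) (l : List Int) (idx : Int) (ranges : List (Int × Int)) (s e : Int) :
    List (Int × Int) × Int × Int :=
  match l with
  | [] => (ranges, s, e)
  | d :: t =>
    if d ≤ md then
      if s = -1 then aLoop md t (idx + 1) ranges idx (idx + 1)
      else aLoop md t (idx + 1) ranges s (e + 1)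
    else
      if s ≠ -1 then aLoop md t (idx + 1) (ranges ++ [(s, e)]) (-1) e
      else aLoop md t (idx + 1) ranges (-1) e

def ComputeRanges (distances : List Int) (max_dist : Int) : List (Int × Int) :=
  let r := aLoop max_dist distances 0 [] (-1) (-1)
  if r.2.1 ≠ -1 then r.1 ++ [(r.2.1, r.2.2)] else r.1

-- ===== PORT B =====
-- B's inner while loop: length of the leading run of distances ≤ md
def runLen (md : Int) : List Int → Nat
  | [] => 0
  | d :: t => if d ≤ md then runLen md t + 1 else 0

-- B's outer while loop
def bGo (md : Int) (l : List Int) (i : Int) : List (Int × Int) :=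
  match l with
  | [] => []
  | d :: t =>
    if d ≤ md then
      let k := runLen md (d :: t)
      (i, i + (k : Int)) :: bGo md ((d :: t).drop k) (i + (k : Int))
    else bGo md t (i + 1)
termination_by l.length
decreasing_by
  · simp only [runLen, if_pos ‹d ≤ md›, List.drop_succ_cons]
    have := List.length_drop (l := t) (i := runLen md t)
    simp only [this, List.length_cons]; omega
  · simp

def ComputeRanges_alt (distances : List Int) (max_dist : Int) : List (Int × Int) :=
  bGo max_dist distances 0

-- ===== PRECONDITION & SPEC =====
def Spec_ComputeRanges (distances : List Int) (max_dist : Int) (out : List (Int × Int)) : Prop := out = ComputeRanges_alt distances max_dist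
instance (distances : List Int) (max_dist : Int) (out : List (Int × Int)) : Decidable (Spec_ComputeRanges distances max_dist out) := by unfold Spec_ComputeRanges; infer_instance

-- ===== CLAIM (what is proved, stated in full; the proofs are below) =====
def Claim_equal_ComputeRanges : Prop := ∀ (distances : List Int) (max_dist : Int), Dom_ComputeRanges distances max_dist → Spec_ComputeRanges distances max_dist (ComputeRanges distances max_dist)

-- ===== LEMMAS AND PROOFS =====

-- A's trailing flush after the loop
def finishA (r : List (Int × Int) × Int × Int) : List (Int × Int) :=
  if r.2.1 ≠ -1 then r.1 ++ [(r.2.1, r.2.2)] else r.1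

-- Joint loop invariant: outside a run (s = -1, any e) the flushed A-loop produces r ++ bGo;
-- inside a run (s ≠ -1, e = current idx) it produces r, the pending range closed at i + runLen,
-- then bGo on the rest.
theorem loop_inv (md : Int) (l : List Int) :
    (∀ (i : Int) (r : List (Int × Int)) (e : Int), 0 ≤ i →
        finishA (aLoop md l i r (-1) e) = r ++ bGo md l i) ∧
    (∀ (i : Int) (r : List (Int × Int)) (s : Int), 0 ≤ i → s ≠ -1 →
        finishA (aLoop md l i r s i) =
          r ++ (s, i + (runLen md l : Int)) :: bGo md (l.drop (runLen md l)) (i + (runLen md l : Int))) := by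
  induction l with
  | nil =>
    constructor
    · intro i r e _
      simp [aLoop, finishA, bGo]
    · intro i r s _ hs
      simp [aLoop, finishA, bGo, runLen, hs]
  | cons d t ih =>
    obtain ⟨ih1, ih2⟩ := ih
    constructor
    · intro i r e hi
      by_cases hd : d ≤ md
      · have hi' : i ≠ -1 := by omega
        rw [aLoop, if_pos hd, if_pos rfl]
        have := ih2 (i + 1) r i (by omega) hi'
        rw [this]
        rw [bGo, if_pos hd]
        simp only [runLen, if_pos hd, List.drop_succ_cons]
        congr 2 <;> push_cast <;> ring_nf
      · rw [aLoop, if_neg hd]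
        simp only [ne_eq, not_true_eq_false, if_false]
        rw [ih1 (i + 1) r e (by omega)]
        rw [bGo, if_neg hd]
    · intro i r s hi hs
      by_cases hd : d ≤ md
      · rw [aLoop, if_pos hd, if_neg hs]
        have := ih2 (i + 1) r s (by omega) hs
        rw [this]
        simp only [runLen, if_pos hd, List.drop_succ_cons]
        congr 2 <;> push_cast <;> ring_nf
      · rw [aLoop, if_neg hd]
        simp only [ne_eq, hs, not_false_eq_true, if_true]
        rw [ih1 (i + 1) (r ++ [(s, i)]) i (by omega)]
        simp only [runLen, if_neg hd, List.drop_zero, Nat.cast_zero, add_zero]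
        rw [bGo, if_neg hd]
        simp

-- ===== VERDICT (by name: the statement is the Claim_ definition above) =====
theorem ComputeRanges_spec : Claim_equal_ComputeRanges := by
  intro distances max_dist _
  show ComputeRanges distances max_dist = ComputeRanges_alt distances max_dist
  have h := (loop_inv max_dist distances).1 0 [] (-1) (by omega)
  simpa [ComputeRanges, ComputeRanges_alt, finishA] using h
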